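-- pv_equiv track=rewrite | github.com/a-baguette/rehab599_final | wiggle_rev5.py | compute_true_return
-- ===== SOURCE A (Python) =====
-- def compute_true_return(gamma_list, cumulant_list):
--     true_return = 0
--     for k, cumulant in enumerate(cumulant_list): # For each k, multiply cumulant by gamma^k
--         gamma_product = 1
--         for i in range(k): # Calculate γᵏ by multiplying k gammas
--             gamma_product *= gamma_list[i]
--         true_return += gamma_product * cumulant
--     return true_return
-- ===== SOURCE B (Python) =====
-- def compute_true_return(gamma_list, cumulant_list):
--     # Single pass with a running prefix product of gammas (O(n) instead of O(n^2)).
--     total = 0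
--     prod = 1
--     for cumulant, gamma in zip(cumulant_list, [1] + list(gamma_list)):
--         prod *= gamma
--         total += prod * cumulant
--     return total
-- ===== Notes on version B (the rewrite author's own statement) =====
-- stated objective: faster
-- what changed: Replaced the nested loop that recomputes the gamma prefix product from scratch for every k by a single pass maintaining a running prefix product over zip(cumulant_list, [1]+gamma_list).
import Mathlib
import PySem

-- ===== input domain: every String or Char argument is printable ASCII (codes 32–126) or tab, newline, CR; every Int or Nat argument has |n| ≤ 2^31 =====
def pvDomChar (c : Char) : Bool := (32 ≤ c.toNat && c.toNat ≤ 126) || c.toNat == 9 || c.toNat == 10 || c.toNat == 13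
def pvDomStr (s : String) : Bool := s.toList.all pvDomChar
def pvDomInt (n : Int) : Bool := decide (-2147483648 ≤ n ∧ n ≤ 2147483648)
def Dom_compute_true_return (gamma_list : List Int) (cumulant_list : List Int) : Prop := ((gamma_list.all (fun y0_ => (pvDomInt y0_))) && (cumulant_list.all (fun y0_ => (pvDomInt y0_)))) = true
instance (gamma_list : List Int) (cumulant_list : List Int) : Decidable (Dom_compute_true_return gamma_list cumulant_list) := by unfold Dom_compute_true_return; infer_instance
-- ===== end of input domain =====

-- B replaces A's quadratic recomputation of the gamma prefix product by a single pass
-- maintaining a running prefix product (objective: faster, measured asymptotic).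


-- ===== PORT A =====
-- for k, cumulant in enumerate(cumulant_list): inner loop over range(k) multiplying gamma_list[i];
-- gamma_list[i] is ported as pyGetD _ _ 0: out-of-range access (IndexError) is excluded by Pre_.
def compute_true_return (gamma_list : List Int) (cumulant_list : List Int) : Int :=
  (PySem.List.enumerate cumulant_list 0).foldl
    (fun true_return kc =>
      true_return +
        ((PySem.List.pyRange 0 kc.1 1).foldl
          (fun gamma_product i => gamma_product * PySem.List.pyGetD gamma_list i 0) 1) * kc.2)
    0

-- ===== PORT B =====
-- total=0; prod=1; for cumulant, gamma in zip(cumulant_list, [1]+gamma_list): prod *= gamma; total += prod*cumulant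
def compute_true_return_alt (gamma_list : List Int) (cumulant_list : List Int) : Int :=
  ((cumulant_list.zip (1 :: gamma_list)).foldl
    (fun s cg => let prod := s.2 * cg.2; (s.1 + prod * cg.1, prod)) (0, 1)).1

-- ===== PRECONDITION & SPEC =====
-- Pre_ excludes exactly the inputs where A raises IndexError (it reads gamma_list[i] for i < len(cumulant_list)-1).
def Pre_compute_true_return (gamma_list : List Int) (cumulant_list : List Int) : Prop :=
  cumulant_list.length ≤ gamma_list.length + 1
instance (gamma_list : List Int) (cumulant_list : List Int) : Decidable (Pre_compute_true_return gamma_list cumulant_list) := by unfold Pre_compute_true_return; infer_instance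
def pvWitness_compute_true_return : List Int × List Int := ([2, 3], [1, 4, 5])

def Spec_compute_true_return (gamma_list : List Int) (cumulant_list : List Int) (out : Int) : Prop := out = compute_true_return_alt gamma_list cumulant_list
instance (gamma_list : List Int) (cumulant_list : List Int) (out : Int) : Decidable (Spec_compute_true_return gamma_list cumulant_list out) := by unfold Spec_compute_true_return; infer_instance

-- ===== CLAIM (what is proved, stated in full; the proofs are below) =====
def Claim_equal_compute_true_return : Prop := ∀ (gamma_list : List Int) (cumulant_list : List Int), Dom_compute_true_return gamma_list cumulant_list → Pre_compute_true_return gamma_list cumulant_list → Spec_compute_true_return gamma_list cumulant_list (compute_true_return gamma_list cumulant_list)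

-- ===== LEMMAS AND PROOFS =====

-- A's inner loop at index n: the prefix product of the first n gammas.
def prefProd (g : List Int) (n : Int) : Int :=
  (PySem.List.pyRange 0 n 1).foldl (fun p i => p * PySem.List.pyGetD g i 0) 1

theorem prefProd_succ (g : List Int) (n : Int) (hn : 0 ≤ n) :
    prefProd g (n + 1) = prefProd g n * PySem.List.pyGetD g n 0 := by
  unfold prefProd
  rw [PySem.List.pyRange_one_succ_right hn, List.foldl_append]
  simp

-- value of (1 :: g) at position n
def oneG (g : List Int) (n : Nat) : Int := (1 :: g).getD n 0

-- the key invariant: q n = product accumulated by B just before step n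
def qval (g : List Int) : Nat → Int
  | 0 => 1
  | n + 1 => prefProd g (n : Int)

theorem qval_mul (g : List Int) (n : Nat) :
    qval g n * oneG g n = prefProd g (n : Int) := by
  cases n with
  | zero => simp [qval, oneG, prefProd, PySem.List.pyRange]
  | succ m =>
    have hc : ((m + 1 : Nat) : Int) = (m : Int) + 1 := by push_cast; ring
    rw [qval, oneG, hc, prefProd_succ g (m : Int) (Int.natCast_nonneg m),
      PySem.List.pyGetD_natCast]
    simp [List.getD]

theorem key (g : List Int) (cs : List Int) (n : Nat) (acc : Int)
    (h : n + cs.length ≤ g.length + 1) :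
    (PySem.List.enumerate cs (n : Int)).foldl
      (fun true_return kc =>
        true_return +
          ((PySem.List.pyRange 0 kc.1 1).foldl
            (fun gamma_product i => gamma_product * PySem.List.pyGetD g i 0) 1) * kc.2)
      acc
    =
    ((cs.zip ((1 :: g).drop n)).foldl
      (fun s cg => let prod := s.2 * cg.2; (s.1 + prod * cg.1, prod)) (acc, qval g n)).1 := by
  induction cs generalizing n acc with
  | nil => simp [PySem.List.enumerate]
  | cons c cs ih =>
    simp only [List.length_cons] at h
    have hn : n < (1 :: g).length := by simp; omega
    rw [PySem.List.enumerate_cons, List.drop_eq_getElem_cons hn]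
    simp only [List.zip_cons_cons, List.foldl_cons]
    have hget : (1 :: g)[n] = oneG g n := by
      simp [oneG, List.getD, List.getElem?_eq_getElem hn]
    rw [hget]
    have hq : qval g n * oneG g n = prefProd g (n : Int) := qval_mul g n
    have hcast : ((n : Int) + 1) = ((n + 1 : Nat) : Int) := by push_cast; ring
    rw [hcast, ih (n + 1) _ (by omega)]
    simp only [hq]
    rfl

theorem compute_eq (g cs : List Int) (h : cs.length ≤ g.length + 1) :
    compute_true_return g cs = compute_true_return_alt g cs := by
  unfold compute_true_return compute_true_return_alt
  have := key g cs 0 0 (by omega)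
  simpa [qval] using this

-- ===== VERDICT (by name: the statement is the Claim_ definition above) =====
theorem compute_true_return_spec : Claim_equal_compute_true_return := by
  intro g cs _ hpre
  unfold Spec_compute_true_return
  exact compute_eq g cs hpre
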